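-- pv_equiv track=rewrite | github.com/TiburzioFoglia/TestSelectorForIntegration | src/analysis_classes/complexity_analyzer.py | _estimate_cognitive_complexity
-- ===== SOURCE A (Python) =====
-- def _estimate_cognitive_complexity(code: str) -> int:
--     """Stima la complessità cognitiva (semplificata)"""
--     # Implementazione semplificata della complessità cognitiva
--     cognitive_keywords = {
--         'if': 1, 'else': 1, 'while': 1, 'for': 1, 'foreach': 1,
--         'switch': 1, 'case': 1, 'catch': 2, 'finally': 1,
--         '&&': 1, '||': 1, '?': 1  # operatori ternari e logici
--     }
--
--     complexity = 0
--     nesting_level = 0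
--
--     lines = code.split('\n')
--     for line in lines:
--         line_lower = line.strip().lower()
--
--         # Conta i livelli di nesting
--         if '{' in line:
--             nesting_level += line.count('{')
--         if '}' in line:
--             nesting_level -= line.count('}')
--             nesting_level = max(0, nesting_level)
--
--         # Aggiungi complessità per keywords
--         for keyword, weight in cognitive_keywords.items():
--             if keyword in line_lower:
--                 # Incrementa complessità basata sul nesting
--                 complexity += weight * (1 + nesting_level)
--
--     return complexity
-- ===== SOURCE B (Python) =====
-- def _estimate_cognitive_complexity(code: str) -> int:
--     """Different algorithm: brace-balance prefix sums + running minimum replace the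
--     clamped accumulator (level_i = S_i - min(0, min_{j<=i} S_j)), and the scoring
--     loop is interchanged: outer over keywords, inner over (lowered line, depth)."""
--     weights = {
--         'if': 1, 'else': 1, 'while': 1, 'for': 1, 'foreach': 1,
--         'switch': 1, 'case': 1, 'catch': 2, 'finally': 1,
--         '&&': 1, '||': 1, '?': 1
--     }
--
--     lines = code.split('\n')
--
--     # prefix sums of the raw brace balance (no clamping here)
--     prefix = []
--     s = 0
--     for line in lines:
--         s += line.count('{') - line.count('}')
--         prefix.append(s)
--
--     # depth[i] = prefix[i] - running minimum of (0, prefix[0..i])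
--     depth = []
--     m = 0
--     for p in prefix:
--         m = min(m, p)
--         depth.append(p - m)
--
--     lowered = [line.strip().lower() for line in lines]
--
--     total = 0
--     for kw, w in weights.items():
--         total += w * sum(1 + d for ll, d in zip(lowered, depth) if kw in ll)
--     return total
-- ===== Notes on version B (the rewrite author's own statement) =====
-- stated objective: alternative
-- what changed: A's single stateful loop (clamped running nesting level updated per line while adding weight*(1+level) for each matched keyword) is replaced by a different algorithm: compute raw brace-balance prefix sums, derive each line's depth as prefix[i] minus the running minimum of (0, prefix[0..i]) (the closed-form of the clamp), and interchange the scoring loops to iterate keywords outermost, summing w*sum(1+depth) over the lines containing each keyword.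
import Mathlib
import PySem

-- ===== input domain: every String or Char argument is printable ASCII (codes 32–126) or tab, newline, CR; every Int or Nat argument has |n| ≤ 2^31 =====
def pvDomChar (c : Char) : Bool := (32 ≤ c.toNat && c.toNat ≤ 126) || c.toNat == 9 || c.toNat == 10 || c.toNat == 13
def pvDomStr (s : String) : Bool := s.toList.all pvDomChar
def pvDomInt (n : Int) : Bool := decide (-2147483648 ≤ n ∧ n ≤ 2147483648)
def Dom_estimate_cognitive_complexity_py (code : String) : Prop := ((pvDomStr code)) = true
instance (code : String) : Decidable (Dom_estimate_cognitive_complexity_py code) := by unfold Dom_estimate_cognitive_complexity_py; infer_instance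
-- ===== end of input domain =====

-- B replaces A's clamped running nesting accumulator by brace-balance prefix sums with a
-- running minimum (level_i = S_i - min(0, min_{j<=i} S_j)) and interchanges the scoring loops
-- (outer over keywords, inner over (lowered line, depth) pairs); objective: alternative algorithm.


-- ===== PORT A =====
-- the fixed keyword→weight dict, in insertion order (shared constant table)
def ecc_weights : List (List Char × Int) :=
  [("if".toList, 1), ("else".toList, 1), ("while".toList, 1), ("for".toList, 1),
   ("foreach".toList, 1), ("switch".toList, 1), ("case".toList, 1), ("catch".toList, 2),
   ("finally".toList, 1), ("&&".toList, 1), ("||".toList, 1), ("?".toList, 1)]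

def estimate_cognitive_complexity_py (code : String) : Int :=
  let lines := PySem.Chars.splitOn code.toList ['\n']
  (lines.foldl (fun (st : Int × Int) line =>
      let line_lower := PySem.Chars.lower (PySem.Chars.strip line)
      let n1 := if PySem.Chars.isIn ['{'] line then st.2 + (PySem.Chars.count line ['{'] : Int) else st.2
      let n2 := if PySem.Chars.isIn ['}'] line then max 0 (n1 - (PySem.Chars.count line ['}'] : Int)) else n1
      (ecc_weights.foldl (fun acc kw =>
          if PySem.Chars.isIn kw.1 line_lower then acc + kw.2 * (1 + n2) else acc) st.1,
       n2))
    (0, 0)).1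

-- ===== PORT B =====
def estimate_cognitive_complexity_py_alt (code : String) : Int :=
  let lines := PySem.Chars.splitOn code.toList ['\n']
  let prefixes := (lines.foldl (fun (st : Int × List Int) line =>
      let s := st.1 + (PySem.Chars.count line ['{'] : Int) - (PySem.Chars.count line ['}'] : Int)
      (s, st.2 ++ [s])) ((0 : Int), ([] : List Int))).2
  let depth := (prefixes.foldl (fun (st : Int × List Int) p =>
      let m := min st.1 p
      (m, st.2 ++ [p - m])) ((0 : Int), ([] : List Int))).2
  let lowered := lines.map (fun line => PySem.Chars.lower (PySem.Chars.strip line))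
  ecc_weights.foldl (fun tot kw =>
      tot + kw.2 * (((lowered.zip depth).filter (fun q => PySem.Chars.isIn kw.1 q.1)).map
        (fun q => 1 + q.2)).sum) 0

-- ===== PRECONDITION & SPEC =====
def Spec_estimate_cognitive_complexity_py (code : String) (out : Int) : Prop := out = estimate_cognitive_complexity_py_alt code
instance (code : String) (out : Int) : Decidable (Spec_estimate_cognitive_complexity_py code out) := by unfold Spec_estimate_cognitive_complexity_py; infer_instance

-- ===== CLAIM (what is proved, stated in full; the proofs are below) =====
def Claim_equal_estimate_cognitive_complexity_py : Prop := ∀ (code : String), Dom_estimate_cognitive_complexity_py code → Spec_estimate_cognitive_complexity_py code (estimate_cognitive_complexity_py code)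

-- ===== LEMMAS AND PROOFS =====

-- total matched-keyword weight of an already lowered/stripped line
def ecc_lw (ll : List Char) : Int :=
  (((ecc_weights.filter (fun kw => PySem.Chars.isIn kw.1 ll)).map Prod.snd).sum)

-- recursive characterisation of A's clamped depth sequence
def eccScan (lvl : Int) : List (List Char) → List Int
  | [] => []
  | l :: ls =>
    let lvl' := max 0 (lvl + (PySem.Chars.count l ['{'] : Int) - (PySem.Chars.count l ['}'] : Int))
    lvl' :: eccScan lvl' ls

-- recursive characterisations of B's two scans
def eccPref (s : Int) : List (List Char) → List Int
  | [] => []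
  | l :: ls =>
    let s' := s + (PySem.Chars.count l ['{'] : Int) - (PySem.Chars.count l ['}'] : Int)
    s' :: eccPref s' ls

def eccMin (m : Int) : List Int → List Int
  | [] => []
  | p :: ps =>
    let m' := min m p
    (p - m') :: eccMin m' ps

lemma ecc_pfold (lines : List (List Char)) : ∀ (S : Int) (acc : List Int),
    (lines.foldl (fun (st : Int × List Int) line =>
      let s := st.1 + (PySem.Chars.count line ['{'] : Int) - (PySem.Chars.count line ['}'] : Int)
      (s, st.2 ++ [s])) (S, acc)).2 = acc ++ eccPref S lines := by
  induction lines with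
  | nil => intro S acc; simp [eccPref]
  | cons l ls ih => intro S acc; simp [List.foldl, eccPref, ih]

lemma ecc_mfold (ps : List Int) : ∀ (M : Int) (acc : List Int),
    (ps.foldl (fun (st : Int × List Int) p =>
      let m := min st.1 p
      (m, st.2 ++ [p - m])) (M, acc)).2 = acc ++ eccMin M ps := by
  induction ps with
  | nil => intro M acc; simp [eccMin]
  | cons p t ih => intro M acc; simp [List.foldl, eccMin, ih]

-- the prefix-sum / running-min identity: B's depths are A's clamped levels
lemma ecc_min_pref (lines : List (List Char)) : ∀ (S M : Int), M ≤ 0 →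
    eccMin M (eccPref S lines) = eccScan (S - M) lines := by
  induction lines with
  | nil => intro S M _; simp [eccPref, eccMin, eccScan]
  | cons l ls ih =>
    intro S M hM
    simp only [eccPref, eccMin, eccScan]
    rw [ih (S + (PySem.Chars.count l ['{'] : Int) - (PySem.Chars.count l ['}'] : Int))
        (min M (S + (PySem.Chars.count l ['{'] : Int) - (PySem.Chars.count l ['}'] : Int)))
        (by omega)]
    have h1 : S + (PySem.Chars.count l ['{'] : Int) - (PySem.Chars.count l ['}'] : Int)
        - min M (S + (PySem.Chars.count l ['{'] : Int) - (PySem.Chars.count l ['}'] : Int))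
        = max 0 (S - M + (PySem.Chars.count l ['{'] : Int) - (PySem.Chars.count l ['}'] : Int)) := by
      omega
    rw [h1]

lemma ecc_count_go_of_not_infix (sub : List Char) :
    ∀ (fuel : Nat) (s : List Char) (acc : Nat), ¬ sub <:+: s →
      PySem.Chars.count.go sub fuel s acc = acc := by
  intro fuel
  induction fuel with
  | zero => intro s acc _; simp [PySem.Chars.count.go]
  | succ n ih =>
    intro s acc h
    cases s with
    | nil => simp [PySem.Chars.count.go]
    | cons c t =>
      have hpre : sub.isPrefixOf (c :: t) = false := by
        by_contra hc
        exact h ((List.isPrefixOf_iff_prefix.mp (by simpa using hc)).isInfix)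
      simp only [PySem.Chars.count.go, hpre, Bool.false_eq_true, if_false]
      exact ih t acc (fun hinf => h (hinf.trans (List.suffix_cons c t).isInfix))

lemma ecc_count_eq_zero (s sub : List Char) (hne : sub ≠ [])
    (h : PySem.Chars.isIn sub s = false) : PySem.Chars.count s sub = 0 := by
  have hinf : ¬ sub <:+: s := (PySem.Chars.isIn_eq_false_iff sub s).mp h
  have hemp : sub.isEmpty = false := by cases sub with
    | nil => exact absurd rfl hne
    | cons a t => rfl
  simp only [PySem.Chars.count, hemp, Bool.false_eq_true, if_false]
  exact ecc_count_go_of_not_infix sub s.length s 0 hinf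

lemma ecc_wfold (ws : List (List Char × Int)) (p : List Char × Int → Bool) (c m : Int) :
    ws.foldl (fun acc kw => if p kw then acc + kw.2 * m else acc) c
      = c + (((ws.filter (fun kw => p kw)).map Prod.snd).sum) * m := by
  induction ws generalizing c with
  | nil => simp
  | cons k t ih => by_cases h : p k <;> simp [h, ih] <;> ring

-- A's fold equals the line-outer sum over (line, clamped depth) pairs
lemma ecc_main (lines : List (List Char)) : ∀ (C L : Int), 0 ≤ L →
    (lines.foldl (fun (st : Int × Int) line =>
      let line_lower := PySem.Chars.lower (PySem.Chars.strip line)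
      let n1 := if PySem.Chars.isIn ['{'] line then st.2 + (PySem.Chars.count line ['{'] : Int) else st.2
      let n2 := if PySem.Chars.isIn ['}'] line then max 0 (n1 - (PySem.Chars.count line ['}'] : Int)) else n1
      (ecc_weights.foldl (fun acc kw =>
          if PySem.Chars.isIn kw.1 line_lower then acc + kw.2 * (1 + n2) else acc) st.1,
       n2)) (C, L)).1
    = (lines.zip (eccScan L lines)).foldl
        (fun acc p => acc + ecc_lw (PySem.Chars.lower (PySem.Chars.strip p.1)) * (1 + p.2)) C := by
  induction lines with
  | nil => intro C L _; simp
  | cons l ls ih =>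
    intro C L hL
    have hn2 : (if PySem.Chars.isIn ['}'] l then
          max 0 ((if PySem.Chars.isIn ['{'] l then L + (PySem.Chars.count l ['{'] : Int) else L)
                  - (PySem.Chars.count l ['}'] : Int))
        else (if PySem.Chars.isIn ['{'] l then L + (PySem.Chars.count l ['{'] : Int) else L))
        = max 0 (L + (PySem.Chars.count l ['{'] : Int) - (PySem.Chars.count l ['}'] : Int)) := by
      by_cases h1 : PySem.Chars.isIn ['{'] l <;> by_cases h2 : PySem.Chars.isIn ['}'] l <;>
        simp only [h1, h2, if_true] <;>
        first
        | rfl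
        | (rw [ecc_count_eq_zero l ['{'] (by simp) (by simpa using h1)]; omega)
        | (rw [ecc_count_eq_zero l ['}'] (by simp) (by simpa using h2)]; omega)
        | (rw [ecc_count_eq_zero l ['{'] (by simp) (by simpa using h1),
               ecc_count_eq_zero l ['}'] (by simp) (by simpa using h2)]; omega)
    simp only [List.foldl, eccScan, List.zip_cons_cons, hn2]
    rw [ih _ _ (by omega), ecc_wfold]
    rfl

-- filtered sum pulled inside the map as an if-term
lemma ecc_sum_filter (P : List (List Char × Int)) (p : List Char × Int → Bool) (w : Int) :
    w * ((P.filter p).map (fun q => (1 : Int) + q.2)).sum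
      = (P.map (fun q => if p q then w * (1 + q.2) else 0)).sum := by
  induction P with
  | nil => simp
  | cons q t ih => by_cases h : p q <;> simp [h, ← ih] <;> ring

-- a fold with an additive body is the sum of the mapped list
lemma ecc_fold_sum {α : Type} (P : List α) (g : α → Int) : ∀ (C : Int),
    P.foldl (fun acc p => acc + g p) C = C + (P.map g).sum := by
  induction P with
  | nil => intro C; simp
  | cons q t ih => intro C; simp [List.foldl, ih]; ring

-- loop interchange: keyword-outer accumulation = line-outer weighted sum
lemma ecc_interchange (ws : List (List Char × Int)) (P : List (List Char × Int)) : ∀ (C : Int),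
    ws.foldl (fun tot kw =>
        tot + kw.2 * ((P.filter (fun q => PySem.Chars.isIn kw.1 q.1)).map (fun q => (1 : Int) + q.2)).sum) C
      = C + (P.map (fun q =>
          (((ws.filter (fun kw => PySem.Chars.isIn kw.1 q.1)).map Prod.snd).sum) * (1 + q.2))).sum := by
  induction ws with
  | nil => intro C; simp
  | cons k t ih =>
    intro C
    simp only [List.foldl, ih]
    rw [ecc_sum_filter]
    have : (P.map (fun q =>
        ((((k :: t).filter (fun kw => PySem.Chars.isIn kw.1 q.1)).map Prod.snd).sum) * (1 + q.2)))
      = P.map (fun q => (if PySem.Chars.isIn k.1 q.1 then k.2 * (1 + q.2) else 0)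
          + (((t.filter (fun kw => PySem.Chars.isIn kw.1 q.1)).map Prod.snd).sum) * (1 + q.2)) := by
      refine List.map_congr_left (fun q _ => ?_)
      by_cases h : PySem.Chars.isIn k.1 q.1 <;> simp [List.filter_cons, h] <;> ring
    rw [this, List.sum_map_add]
    ring

-- ===== VERDICT (by name: the statement is the Claim_ definition above) =====
theorem estimate_cognitive_complexity_py_spec : Claim_equal_estimate_cognitive_complexity_py := by
  intro code _
  unfold Spec_estimate_cognitive_complexity_py
  unfold estimate_cognitive_complexity_py estimate_cognitive_complexity_py_alt
  simp only [ecc_pfold, ecc_mfold, List.nil_append, ecc_min_pref _ 0 0 le_rfl, sub_zero]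
  rw [ecc_main _ 0 0 le_rfl, ecc_interchange, zero_add]
  rw [ecc_fold_sum, zero_add, List.zip_map_left, List.map_map]
  refine congrArg List.sum (List.map_congr_left (fun q _ => ?_))
  rfl
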